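-- pv_equiv track=rewrite | github.com/WChan1027/Algorithm-Problem | Programmers/Lv.2/두 큐 합 같게 만들기 (2022 KAKAO TECH INTERNSHIP).py | solution
-- ===== SOURCE A (Python) =====
-- from collections import deque
--
-- def solution(queue1, queue2):
--     all_elements = queue1 + queue2
--     if sum(all_elements) % 2:
--         return -1
--
--     queue1, queue2 = deque(queue1), deque(queue2)
--     cnt = 0
--     q1, q2 = sum(queue1), sum(queue2)
--
--     while True:
--         if q1 > q2:
--             n = queue1.popleft()
--             queue2.append(n)
--             q1, q2 = q1 - n, q2 + n
--         elif q1 < q2: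
--             n = queue2.popleft()
--             queue1.append(n)
--             q1, q2 = q1 + n, q2 - n
--         else:
--             return cnt
--
--         cnt += 1
--         if cnt == len(all_elements) * 2:
--             return -1
-- ===== SOURCE B (Python) =====
-- def solution(queue1, queue2):
--     total = sum(queue1) + sum(queue2)
--     if total % 2:
--         return -1
--     if not queue1 and not queue2:
--         return 0
--     target = total // 2
--     L = len(queue1) + len(queue2)
--     # prefix-sum table of the concatenation tiled three times: P[k] = sum of first k tiled elements
--     P = [0]
--     for x in (queue1 + queue2) * 3:
--         P.append(P[-1] + x)
--     i, j = 0, len(queue1)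
--     for cnt in range(2 * L):
--         s = P[j] - P[i]
--         if s == target:
--             return cnt
--         if s > target:
--             i += 1
--         else:
--             j += 1
--     return -1
-- ===== Notes on version B (the rewrite author's own statement) =====
-- stated objective: alternative
-- what changed: B keeps no running state at all: it precomputes a prefix-sum table of the concatenation tiled three times in a separate pass, then a bounded for-loop moves two pointers and reads each window sum as a pure table difference P[j]-P[i], instead of A's deque mutation with two incrementally updated sums and a mid-loop counter check.
-- outside the precondition, e.g. on solution([-1], [-1]): A returns 0, B returns 0; on solution([], [-2]): A raises IndexError, B returns -1
import Mathlib
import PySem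

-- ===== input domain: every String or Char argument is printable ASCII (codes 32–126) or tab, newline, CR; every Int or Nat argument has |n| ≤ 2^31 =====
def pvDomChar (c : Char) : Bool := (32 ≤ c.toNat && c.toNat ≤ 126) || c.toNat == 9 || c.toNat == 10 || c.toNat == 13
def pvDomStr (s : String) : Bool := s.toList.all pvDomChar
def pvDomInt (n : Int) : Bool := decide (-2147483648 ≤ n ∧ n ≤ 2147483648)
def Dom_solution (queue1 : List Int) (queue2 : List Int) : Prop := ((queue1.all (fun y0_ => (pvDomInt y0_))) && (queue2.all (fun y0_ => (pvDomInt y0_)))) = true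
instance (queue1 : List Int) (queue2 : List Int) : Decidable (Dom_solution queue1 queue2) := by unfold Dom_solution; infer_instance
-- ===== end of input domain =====

-- B replaces A's deque shuffling and running sums by a separately built prefix-sum table of
-- the thrice-tiled concatenation, read by a bounded pointer scan (alternative decomposition,
-- same cost); same return value on Pre_solution.

-- ===== PORT A =====
-- A's while-True loop, bounded by the cnt == len(all)*2 check; fuel = remaining possible
-- iterations + 1, strictly more than the loop can use, so the fuel-0 arm is unreachable.
def loopA : Nat → List Int → List Int → Int → Int → Int → Int → Int
  | 0, _, _, _, _, _, _ => 0  -- unreachable (fuel exceeds the cnt bound)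
  | fuel+1, q1, q2, s1, s2, cnt, bound =>
    if s1 > s2 then
      match q1 with
      | [] => 0  -- Python raises IndexError here; excluded by Pre_solution
      | n :: rest =>
        if cnt + 1 = bound then -1
        else loopA fuel rest (q2 ++ [n]) (s1 - n) (s2 + n) (cnt + 1) bound
    else if s1 < s2 then
      match q2 with
      | [] => 0  -- Python raises IndexError here; excluded by Pre_solution
      | n :: rest =>
        if cnt + 1 = bound then -1
        else loopA fuel (q1 ++ [n]) rest (s1 + n) (s2 - n) (cnt + 1) bound
    else cnt

def solution (queue1 : List Int) (queue2 : List Int) : Int :=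
  let all := queue1 ++ queue2
  if PySem.Int.mod all.sum 2 ≠ 0 then -1
  else loopA (all.length * 2 + 1) queue1 queue2 queue1.sum queue2.sum 0 ((all.length : Int) * 2)

-- ===== PORT B =====
-- the P.append(P[-1] + x) loop building the prefix-sum table
def buildP (T : List Int) : List Int :=
  T.foldl (fun acc x => acc ++ [acc.getLast! + x]) [0]

-- P[k]; the indices B uses are always in range (proved), so the getD default is never used
def pyAt (P : List Int) (k : Int) : Int :=
  (PySem.List.pyGet? P k).getD 0

-- the 'for cnt in range(2*L)' pointer scan; rem = number of remaining loop iterations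
def loopB : Nat → List Int → Int → Int → Int → Int → Int
  | 0, _, _, _, _, _ => -1
  | rem+1, P, target, i, j, cnt =>
    let s := pyAt P j - pyAt P i
    if s = target then cnt
    else if s > target then loopB rem P target (i + 1) j (cnt + 1)
    else loopB rem P target i (j + 1) (cnt + 1)

def solution_alt (queue1 : List Int) (queue2 : List Int) : Int :=
  let total := queue1.sum + queue2.sum
  if PySem.Int.mod total 2 ≠ 0 then -1
  else if queue1.isEmpty && queue2.isEmpty then 0
  else
    let target := PySem.Int.floordiv total 2
    let L := queue1.length + queue2.length
    let C := queue1 ++ queue2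
    let P := buildP (C ++ C ++ C)
    loopB (2 * L) P target 0 (queue1.length : Int) 0

-- ===== PRECONDITION & SPEC =====
-- Pre_ excludes inputs with an even, negative total sum: on some of those A raises
-- IndexError by popping an empty deque (e.g. ([], [-2])); where the total is odd or
-- nonnegative A always returns normally.
def Pre_solution (queue1 : List Int) (queue2 : List Int) : Prop :=
  PySem.Int.mod (queue1 ++ queue2).sum 2 ≠ 0 ∨ 0 ≤ (queue1 ++ queue2).sum
instance (queue1 : List Int) (queue2 : List Int) : Decidable (Pre_solution queue1 queue2) := by
  unfold Pre_solution; infer_instance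

def pvWitness_solution : List Int × List Int := ([1, 2], [3])

def Spec_solution (queue1 : List Int) (queue2 : List Int) (out : Int) : Prop :=
  out = solution_alt queue1 queue2
instance (queue1 : List Int) (queue2 : List Int) (out : Int) : Decidable (Spec_solution queue1 queue2 out) := by
  unfold Spec_solution; infer_instance

-- ===== CLAIM (what is proved, stated in full; the proofs are below) =====
def Claim_equal_solution : Prop := ∀ (queue1 : List Int) (queue2 : List Int), Dom_solution queue1 queue2 → Pre_solution queue1 queue2 → Spec_solution queue1 queue2 (solution queue1 queue2)

-- ===== LEMMAS AND PROOFS =====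

-- element k of the infinite tiling of C (proof-only helper)
def getWrap (C : List Int) (L : Int) (k : Int) : Int :=
  (PySem.List.pyGet? C (PySem.Int.mod k L)).getD 0

-- the window C[i:j] of the circular tiling of C, as a list (proof-only helper)
def win (C : List Int) (L : Int) (i j : Int) : List Int :=
  (List.range (j - i).toNat).map (fun (k : Nat) => getWrap C L (i + (k : Int)))

-- prefix-sum list starting from s (proof-only model of buildP)
def pl (s : Int) : List Int → List Int
  | [] => [s]
  | x :: t => s :: pl (s + x) t

theorem win_nil (C : List Int) (L i j : Int) (h : j ≤ i) : win C L i j = [] := by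
  unfold win
  have : (j - i).toNat = 0 := by omega
  simp [this]

theorem win_cons (C : List Int) (L i j : Int) (h : i < j) :
    win C L i j = getWrap C L i :: win C L (i + 1) j := by
  unfold win
  have h1 : (j - i).toNat = (j - (i + 1)).toNat + 1 := by omega
  rw [h1, List.range_succ_eq_map, List.map_cons, List.map_map]
  refine congrArg₂ _ (by norm_num) ?_
  apply List.map_congr_left
  intro k _
  simp only [Function.comp]
  congr 1
  push_cast; ring

theorem win_snoc (C : List Int) (L i j : Int) (h : i ≤ j) :
    win C L i (j + 1) = win C L i j ++ [getWrap C L j] := by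
  unfold win
  have h1 : (j + 1 - i).toNat = (j - i).toNat + 1 := by omega
  rw [h1, List.range_succ, List.map_append, List.map_cons, List.map_nil,
    show i + (((j - i).toNat : Nat) : Int) = j from by omega]

theorem getWrap_add_right (C : List Int) (L k : Int) (hL : 0 < L) :
    getWrap C L (k + L) = getWrap C L k := by
  unfold getWrap
  rw [PySem.Int.mod_eq_emod_of_pos hL, PySem.Int.mod_eq_emod_of_pos hL, Int.add_emod_right]

theorem getWrap_small (C : List Int) (t : Int) (h0 : 0 ≤ t) (ht : t < (C.length : Int)) :
    getWrap C (C.length : Int) t = C.getD t.toNat 0 := by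
  have hL : (0 : Int) < C.length := by omega
  unfold getWrap
  rw [PySem.Int.mod_eq_emod_of_pos hL, Int.emod_eq_of_lt h0 ht,
    PySem.List.pyGet?_of_nonneg C h0]
  rw [List.getD_eq_getElem?_getD]

theorem win_init1 (a b : List Int) :
    win (a ++ b) (((a ++ b).length : Int)) 0 (a.length : Int) = a := by
  apply List.ext_getElem
  · simp [win]
  · intro k h1 h2
    simp only [win, List.getElem_map, List.getElem_range]
    have hk : k < a.length := by simpa [win] using h2
    have h0 : (0 : Int) + (k : Int) = (k : Int) := by ring
    rw [h0, getWrap_small (a ++ b) (k : Int) (by positivity) (by simp; omega)]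
    rw [Int.toNat_natCast, List.getD_eq_getElem?_getD, List.getElem?_append_left hk]
    simp [List.getElem?_eq_getElem hk]

theorem win_init2 (a b : List Int) :
    win (a ++ b) (((a ++ b).length : Int)) (a.length : Int) ((a ++ b).length : Int) = b := by
  apply List.ext_getElem
  · simp [win]
  · intro k h1 h2
    simp only [win, List.getElem_map, List.getElem_range]
    have hk : k < b.length := by simpa [win] using h2
    rw [getWrap_small (a ++ b) ((a.length : Int) + (k : Int)) (by positivity) (by simp; omega)]
    have ht : ((a.length : Int) + (k : Int)).toNat = a.length + k := by omega
    rw [ht, List.getD_eq_getElem?_getD, List.getElem?_append_right (by omega)]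
    simp [hk]

-- buildP computes pl 0
theorem foldP_eq (T : List Int) : ∀ (a : List Int) (s : Int),
    T.foldl (fun acc x => acc ++ [acc.getLast! + x]) (a ++ [s]) = a ++ pl s T := by
  induction T with
  | nil => intro a s; simp [pl]
  | cons x t ih =>
    intro a s
    simp only [List.foldl_cons, pl]
    have hlast : (a ++ [s]).getLast! = s := by
      simp [List.getLast!_eq_getLast?_getD]
    rw [hlast, show (a ++ [s]) ++ [s + x] = (a ++ [s]) ++ [s + x] from rfl,
      List.append_assoc a [s] [s + x], ← List.append_assoc a [s] [s + x]]
    rw [ih (a ++ [s]) (s + x)]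
    simp

theorem buildP_eq (T : List Int) : buildP T = pl 0 T := by
  unfold buildP
  have := foldP_eq T [] 0
  simpa using this

theorem pl_get (T : List Int) : ∀ (s : Int) (k : Nat), k ≤ T.length →
    (pl s T)[k]? = some (s + (T.take k).sum) := by
  induction T with
  | nil =>
    intro s k hk
    have : k = 0 := by simpa using hk
    subst this
    simp [pl]
  | cons x t ih =>
    intro s k hk
    match k with
    | 0 => simp [pl]
    | k+1 =>
      have hk' : k ≤ t.length := by simpa using hk
      simp only [pl, List.getElem?_cons_succ, List.take_succ_cons, List.sum_cons]
      rw [ih (s + x) k hk']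
      ring_nf

-- element k of the triple tiling equals getWrap
theorem tile_get (C : List Int) (k : Nat) (hk : k < 3 * C.length) :
    (C ++ C ++ C)[k]? = some (getWrap C (C.length : Int) (k : Int)) := by
  have hL : 0 < C.length := by omega
  by_cases h1 : k < C.length
  · rw [List.getElem?_append_left (by simp; omega), List.getElem?_append_left h1]
    rw [getWrap_small C (k : Int) (by positivity) (by omega)]
    simp [List.getD_eq_getElem?_getD, List.getElem?_eq_getElem h1]
  · by_cases h2 : k < 2 * C.length
    · rw [List.getElem?_append_left (by simp; omega), List.getElem?_append_right (by omega)]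
      have : (k : Int) = ((k - C.length : Nat) : Int) + (C.length : Int) := by omega
      rw [this, getWrap_add_right C _ _ (by omega),
        getWrap_small C _ (by positivity) (by omega)]
      have hlt : k - C.length < C.length := by omega
      simp [List.getD_eq_getElem?_getD, List.getElem?_eq_getElem hlt]
    · rw [List.getElem?_append_right (by simp; omega)]
      have hidx : k - (C ++ C).length = k - 2 * C.length := by simp; omega
      rw [hidx]
      have : (k : Int) = (((k - 2 * C.length : Nat) : Int) + (C.length : Int)) + (C.length : Int) := by omega
      rw [this, getWrap_add_right C _ _ (by omega), getWrap_add_right C _ _ (by omega),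
        getWrap_small C _ (by positivity) (by omega)]
      have hlt : k - 2 * C.length < C.length := by omega
      simp [List.getD_eq_getElem?_getD, List.getElem?_eq_getElem hlt]

-- prefix sums of the tiling are window sums from 0
theorem take_sum_win (C : List Int) : ∀ (k : Nat), k ≤ 3 * C.length →
    ((C ++ C ++ C).take k).sum = (win C (C.length : Int) 0 (k : Int)).sum := by
  intro k
  induction k with
  | zero => intro _; simp [win_nil]
  | succ k ih =>
    intro hk
    have hk' : k < 3 * C.length := by omega
    have hlen : k < (C ++ C ++ C).length := by simp; omega
    have htg := tile_get C k hk'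
    rw [List.getElem?_eq_getElem hlen] at htg
    have hval : (C ++ C ++ C)[k] = getWrap C (C.length : Int) (k : Int) :=
      Option.some.inj htg
    rw [show ((k + 1 : Nat) : Int) = (k : Int) + 1 from by push_cast; ring,
      win_snoc C _ 0 (k : Int) (by positivity),
      List.take_succ, List.getElem?_eq_getElem hlen, List.sum_append, List.sum_append,
      ih (by omega), hval]
    simp

-- window sums are additive
theorem winsum_split (C : List Int) (L : Int) : ∀ (m : Nat) (a b c : Int), a ≤ b → b ≤ c → c - b = (m : Int) →
    (win C L a c).sum = (win C L a b).sum + (win C L b c).sum := by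
  intro m
  induction m with
  | zero =>
    intro a b c hab hbc hm
    have : c = b := by omega
    subst this
    rw [win_nil C L c c le_rfl]
    simp
  | succ m ih =>
    intro a b c hab hbc hm
    have hc : c = (c - 1) + 1 := by ring
    have hb1 : b ≤ c - 1 := by omega
    rw [hc, win_snoc C L a (c - 1) (by omega), win_snoc C L b (c - 1) hb1,
      List.sum_append, List.sum_append, ih a b (c - 1) hab hb1 (by omega)]
    ring

-- pyAt on the built table, as a window sum
theorem pyAt_buildP (C : List Int) (k : Int) (h0 : 0 ≤ k) (hk : k ≤ 3 * (C.length : Int)) :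
    pyAt (buildP (C ++ C ++ C)) k = (win C (C.length : Int) 0 k).sum := by
  unfold pyAt
  rw [buildP_eq, PySem.List.pyGet?_of_nonneg _ h0]
  have hkn : k.toNat ≤ (C ++ C ++ C).length := by simp; omega
  rw [pl_get (C ++ C ++ C) 0 k.toNat hkn]
  rw [take_sum_win C k.toNat (by simp at hkn; omega)]
  simp [show ((k.toNat : Nat) : Int) = k from by omega]

-- lockstep equivalence of A's deque loop with B's table scan under the window invariant
theorem loop_eq (C : List Int) (L total target n0 : Int) (P : List Int)
    (hL : L = (C.length : Int)) (htot : total = C.sum)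
    (htarget : total = 2 * target) (hpos : 0 ≤ total)
    (hP : ∀ k : Int, 0 ≤ k → k ≤ 3 * L → pyAt P k = (win C L 0 k).sum) :
    ∀ (rem : Nat) (i j s1 s2 cnt : Int), 0 ≤ i → i ≤ j → j ≤ i + L → n0 ≤ j →
      i + j = n0 + cnt → n0 ≤ L →
      s1 = (win C L i j).sum → s2 = (win C L j (i + L)).sum → s1 + s2 = total →
      cnt + (rem : Int) = 2 * L → 1 ≤ rem →
      loopA (rem + 1) (win C L i j) (win C L j (i + L)) s1 s2 cnt (2 * L)
        = loopB rem P target i j cnt := by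
  intro rem
  induction rem with
  | zero => intro i j s1 s2 cnt _ _ _ _ _ _ _ _ _ _ hr; omega
  | succ rem ih =>
    intro i j s1 s2 cnt h0i hij hjiL hn0j hijcnt hn0L hs1 hs2 hsum hcnt _
    have hjb : j ≤ 3 * L - 1 := by omega
    have hib : 0 ≤ i := h0i
    have hsB : pyAt P j - pyAt P i = s1 := by
      rw [hP j (by omega) (by omega), hP i (by omega) (by omega),
        winsum_split C L (j - i).toNat 0 i j h0i hij (by omega), hs1]
      ring
    rcases lt_trichotomy s1 target with hlt | heq | hgt
    · -- s1 < target ⟺ s1 < s2 : A pops queue2's head, B advances j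
      have hcmp1 : ¬ s1 > s2 := by omega
      have hcmp2 : s1 < s2 := by omega
      have hjlt : j < i + L := by
        by_contra hc
        have hje : j = i + L := by omega
        have : s2 = 0 := by rw [hs2, hje, win_nil _ _ _ _ le_rfl]; simp
        omega
      have hq2 : win C L j (i + L) = getWrap C L j :: win C L (j + 1) (i + L) :=
        win_cons C L j (i + L) hjlt
      rw [hq2]
      simp only [loopA, loopB, hsB, if_neg hcmp1, if_pos hcmp2,
        if_neg (by omega : ¬ s1 = target), if_neg (by omega : ¬ s1 > target)]
      by_cases hb : cnt + 1 = 2 * L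
      · have hrem0 : rem = 0 := by omega
        simp [hb, hrem0, loopB]
      · simp only [if_neg hb]
        have hq1' : win C L i j ++ [getWrap C L j] = win C L i (j + 1) :=
          (win_snoc C L i j hij).symm
        rw [hq1']
        exact ih i (j + 1) (s1 + getWrap C L j) (s2 - getWrap C L j) (cnt + 1)
          h0i (by omega) (by omega) (by omega) (by omega) hn0L
          (by rw [win_snoc C L i j hij]; simp [hs1])
          (by rw [hq2] at hs2; simp [List.sum_cons] at hs2; omega)
          (by omega) (by omega) (by omega)
    · -- s1 = target ⟺ s1 = s2 : both return cnt
      have h1 : ¬ s1 > s2 := by omega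
      have h2 : ¬ s1 < s2 := by omega
      simp only [loopA, loopB, hsB, if_neg h1, if_neg h2, if_pos heq]
    · -- s1 > target ⟺ s1 > s2 : A pops queue1's head, B advances i
      have hcmp : s1 > s2 := by omega
      have hilt : i < j := by
        by_contra hc
        have hie : i = j := by omega
        have : s1 = 0 := by rw [hs1, hie, win_nil _ _ _ _ le_rfl]; simp
        omega
      have hLpos : 0 < L := by omega
      have hq1 : win C L i j = getWrap C L i :: win C L (i + 1) j :=
        win_cons C L i j hilt
      rw [hq1]
      simp only [loopA, loopB, hsB, if_pos hcmp,
        if_neg (by omega : ¬ s1 = target), if_pos (by omega : s1 > target)]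
      by_cases hb : cnt + 1 = 2 * L
      · have hrem0 : rem = 0 := by omega
        simp [hb, hrem0, loopB]
      · simp only [if_neg hb]
        have hq2' : win C L j (i + 1 + L) = win C L j (i + L) ++ [getWrap C L i] := by
          rw [show i + 1 + L = (i + L) + 1 from by ring,
            win_snoc C L j (i + L) (by omega), getWrap_add_right C L i hLpos]
        rw [← hq2']
        exact ih (i + 1) j (s1 - getWrap C L i) (s2 + getWrap C L i) (cnt + 1)
          (by omega) (by omega) (by omega) (by omega) (by omega) hn0L
          (by rw [hq1] at hs1; simp [List.sum_cons] at hs1; omega)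
          (by rw [hq2']; simp [hs2])
          (by omega) (by omega) (by omega)

-- ===== VERDICT (by name: the statement is the Claim_ definition above) =====
theorem solution_spec : Claim_equal_solution := by
  intro queue1 queue2 _hdom hpre
  unfold Spec_solution
  by_cases hempty : queue1 = [] ∧ queue2 = []
  · obtain ⟨h1, h2⟩ := hempty; subst h1; subst h2; decide
  · simp only [solution, solution_alt]
    rw [show queue1.sum + queue2.sum = (queue1 ++ queue2).sum from by simp]
    by_cases hodd : PySem.Int.mod (queue1 ++ queue2).sum 2 ≠ 0
    · rw [if_pos hodd, if_pos hodd]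
    · rw [if_neg hodd, if_neg hodd]
      have hne : (queue1.isEmpty && queue2.isEmpty) = false := by
        rcases not_and_or.mp hempty with h | h
        · simp [List.isEmpty_iff, h]
        · simp [List.isEmpty_iff, h]
      rw [if_neg (by simp [hne])]
      simp only [ne_eq, not_not] at hodd
      have hpos : 0 ≤ (queue1 ++ queue2).sum := by
        rcases hpre with h | h
        · exact absurd hodd h
        · exact h
      have hmod : (queue1 ++ queue2).sum % 2 = 0 := by
        rw [PySem.Int.mod_eq_emod_of_pos (by norm_num : (0:Int) < 2)] at hodd; exact hodd
      have htarget : (queue1 ++ queue2).sum = 2 * PySem.Int.floordiv (queue1 ++ queue2).sum 2 := by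
        rw [PySem.Int.floordiv_eq_ediv_of_pos (by norm_num : (0:Int) < 2)]; omega
      have hLpos : 0 < (queue1 ++ queue2).length := by
        rcases not_and_or.mp hempty with h | h
        · have : queue1.length ≠ 0 := by simpa [List.length_eq_zero_iff] using h
          simp; omega
        · have : queue2.length ≠ 0 := by simpa [List.length_eq_zero_iff] using h
          simp; omega
      have e1 := win_init1 queue1 queue2
      have e2 := win_init2 queue1 queue2
      have hP : ∀ k : Int, 0 ≤ k → k ≤ 3 * ((queue1 ++ queue2).length : Int) →
          pyAt (buildP ((queue1 ++ queue2) ++ (queue1 ++ queue2) ++ (queue1 ++ queue2))) k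
            = (win (queue1 ++ queue2) ((queue1 ++ queue2).length : Int) 0 k).sum :=
        fun k h0 hk => pyAt_buildP (queue1 ++ queue2) k h0 hk
      have key := loop_eq (queue1 ++ queue2) ((queue1 ++ queue2).length : Int)
        (queue1 ++ queue2).sum (PySem.Int.floordiv (queue1 ++ queue2).sum 2)
        (queue1.length : Int)
        (buildP ((queue1 ++ queue2) ++ (queue1 ++ queue2) ++ (queue1 ++ queue2)))
        rfl rfl htarget hpos hP
        (2 * (queue1 ++ queue2).length) 0 (queue1.length : Int) queue1.sum queue2.sum 0
        le_rfl (by positivity)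
        (by rw [zero_add, List.length_append]; push_cast; omega)
        le_rfl (by ring)
        (by simp)
        (by rw [e1])
        (by rw [zero_add, e2])
        (by simp) (by push_cast; ring) (by omega)
      rw [zero_add] at key
      rw [e1, e2] at key
      rw [show (queue1 ++ queue2).length * 2 + 1 = 2 * (queue1 ++ queue2).length + 1 from by ring,
        show ((queue1 ++ queue2).length : Int) * 2 = 2 * ((queue1 ++ queue2).length : Int) from by ring,
        show 2 * (queue1.length + queue2.length) = 2 * (queue1 ++ queue2).length from by simp]
      exact key
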